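-- pv_equiv track=rewrite | github.com/hitochan777/mt-tools | recover_half_width_words_segmentation.py | containsAscii
-- ===== SOURCE A (Python) =====
-- def containsAscii(s):
--     try:
--         for c in s:
--             if ord(c) < 128:
--                 return True
--     except:
--         return False
--
--     return False
-- ===== SOURCE B (Python) =====
-- def containsAscii(s):
--     try:
--         return len(s) > 0 and min(map(ord, s)) < 128
--     except:
--         return False
-- ===== Notes on version B (the rewrite author's own statement) =====
-- stated objective: alternative
-- what changed: Replaces the early-return per-character loop with a whole-string minimum of code points: nonempty and min(map(ord, s)) < 128; no explicit loop or early exit remains.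
import Mathlib
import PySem

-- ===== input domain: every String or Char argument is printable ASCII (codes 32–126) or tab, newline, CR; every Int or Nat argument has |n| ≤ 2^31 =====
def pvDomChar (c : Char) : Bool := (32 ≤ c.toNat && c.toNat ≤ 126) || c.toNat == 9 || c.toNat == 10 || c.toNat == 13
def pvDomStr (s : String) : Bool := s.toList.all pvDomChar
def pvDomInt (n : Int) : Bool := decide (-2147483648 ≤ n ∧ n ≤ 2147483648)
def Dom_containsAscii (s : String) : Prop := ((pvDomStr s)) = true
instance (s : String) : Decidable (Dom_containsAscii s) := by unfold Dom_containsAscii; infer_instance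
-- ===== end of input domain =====

-- B replaces A's early-return per-character loop with a whole-string minimum of code points (alternative decomposition, same cost).


-- ===== PORT A =====
-- the for-loop with early 'return True', then the fall-through 'return False'
def containsAsciiLoop : List Char → Bool
  | [] => false
  | c :: rest => if c.toNat < 128 then true else containsAsciiLoop rest

def containsAscii (s : String) : Bool := containsAsciiLoop s.toList

-- ===== PORT B =====
-- len(s) > 0 and min(map(ord, s)) < 128
def containsAscii_alt (s : String) : Bool :=
  match PySem.List.min? (s.toList.map Char.toNat) (fun x => x) with
  | none => false
  | some m => decide (m < 128)

-- ===== PRECONDITION & SPEC =====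
def Spec_containsAscii (s : String) (out : Bool) : Prop := out = containsAscii_alt s
instance (s : String) (out : Bool) : Decidable (Spec_containsAscii s out) := by unfold Spec_containsAscii; infer_instance

-- ===== CLAIM (what is proved, stated in full; the proofs are below) =====
def Claim_equal_containsAscii : Prop := ∀ (s : String), Dom_containsAscii s → Spec_containsAscii s (containsAscii s)

-- ===== LEMMAS AND PROOFS =====

-- the running minimum of the code points is < 128 iff some element (or the seed) is
theorem foldl_min_lt_iff (x : Nat) (xs : List Nat) :
    (xs.foldl min x < 128) ↔ (x < 128 ∨ ∃ y ∈ xs, y < 128) := by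
  induction xs generalizing x with
  | nil => simp
  | cons h t ih =>
    simp only [List.foldl_cons, ih, min_lt_iff, List.mem_cons]
    constructor
    · rintro (⟨h1 | h1⟩ | ⟨y, hy, hlt⟩)
      · exact Or.inl h1
      · exact Or.inr ⟨h, Or.inl rfl, h1⟩
      · exact Or.inr ⟨y, Or.inr hy, hlt⟩
    · rintro (h1 | ⟨y, (rfl | hy), hlt⟩)
      · exact Or.inl (Or.inl h1)
      · exact Or.inl (Or.inr hlt)
      · exact Or.inr ⟨y, hy, hlt⟩

-- A's early-return loop decides existence of an ASCII char
theorem loop_eq_exists (l : List Char) :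
    containsAsciiLoop l = decide (∃ c ∈ l, c.toNat < 128) := by
  induction l with
  | nil => simp [containsAsciiLoop]
  | cons c rest ih =>
    simp only [containsAsciiLoop, ih]
    by_cases hc : c.toNat < 128 <;> simp [hc]

theorem loop_eq_alt (l : List Char) :
    containsAsciiLoop l =
      (match PySem.List.min? (l.map Char.toNat) (fun x => x) with
       | none => false
       | some m => decide (m < 128)) := by
  cases l with
  | nil => rfl
  | cons c rest =>
    simp only [List.map_cons, PySem.List.min?_id_cons, loop_eq_exists]
    have h := foldl_min_lt_iff c.toNat (rest.map Char.toNat)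
    simp only [List.mem_map] at h
    simp only [List.mem_cons]
    rw [decide_eq_decide, h]
    constructor
    · rintro ⟨y, (rfl | hy), hlt⟩
      · exact Or.inl hlt
      · exact Or.inr ⟨y.toNat, ⟨y, hy, rfl⟩, hlt⟩
    · rintro (h1 | ⟨_, ⟨y, hy, rfl⟩, hlt⟩)
      · exact ⟨c, Or.inl rfl, h1⟩
      · exact ⟨y, Or.inr hy, hlt⟩

-- ===== VERDICT (by name: the statement is the Claim_ definition above) =====
theorem containsAscii_spec : Claim_equal_containsAscii := by
  intro s _
  unfold Spec_containsAscii containsAscii containsAscii_alt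
  exact loop_eq_alt s.toList
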